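-- pv_equiv track=rewrite | github.com/ivre/ivre | ivre/utils.py | _espace_slash
-- ===== SOURCE A (Python) =====
-- def _espace_slash(string: str) -> str:
--     """This function transforms '\\/' in '/' but leaves '\\\\/' unchanged. This
--     is useful to parse regexp from Javascript style (/regexp/).
--
--     """
--     escaping = False
--     new_string = ""
--     for char in string:
--         if not escaping and char == "\\":
--             escaping = True
--         elif escaping and char != "/":
--             new_string += "\\" + char
--             escaping = False
--         else:
--             new_string += char
--             escaping = False
--     return new_string
-- ===== SOURCE B (Python) =====
-- def _espace_slash(string: str) -> str:
--     """This function transforms '\\/' in '/' but leaves '\\\\/' unchanged."""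
--     out = []
--     i = 0
--     n = len(string)
--     while i < n:
--         c = string[i]
--         if c == "\\":
--             if i + 1 == n:
--                 # a lone trailing backslash escapes nothing and is dropped
--                 break
--             d = string[i + 1]
--             out.append(d if d == "/" else c + d)
--             i += 2
--         else:
--             out.append(c)
--             i += 1
--     return "".join(out)
-- ===== Notes on version B (the rewrite author's own statement) =====
-- stated objective: alternative
-- what changed: Replaces A's char-by-char boolean escaping-state machine with an index loop that consumes backslash+next-char pairs in one step (emitting '/' for an escaped slash, the pair otherwise) and collects pieces in a list joined once.
import Mathlib
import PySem

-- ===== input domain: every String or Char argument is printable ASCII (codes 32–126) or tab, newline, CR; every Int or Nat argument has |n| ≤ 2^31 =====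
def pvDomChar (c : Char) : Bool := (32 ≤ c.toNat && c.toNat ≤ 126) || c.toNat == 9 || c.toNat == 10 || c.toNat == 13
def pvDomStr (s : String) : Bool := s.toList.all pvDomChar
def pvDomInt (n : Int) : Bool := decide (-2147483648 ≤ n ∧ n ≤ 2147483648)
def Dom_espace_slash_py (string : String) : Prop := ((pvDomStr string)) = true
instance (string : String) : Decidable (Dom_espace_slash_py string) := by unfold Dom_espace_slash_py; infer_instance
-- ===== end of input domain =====

-- B replaces A's escaping-state loop with pairwise consumption of backslash+char; alternative, same result.
-- ===== PORT A =====
-- literal transliteration of A: fold over the characters with state (escaping, new_string)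
def espAStep (st : Bool × List Char) (c : Char) : Bool × List Char :=
  if st.1 = false ∧ c = '\\' then (true, st.2)
  else if st.1 = true ∧ c ≠ '/' then (false, st.2 ++ ['\\', c])
  else (false, st.2 ++ [c])

def espace_slash_py (string : String) : String :=
  String.mk (string.toList.foldl espAStep (false, [])).2

-- ===== PORT B =====
-- B's loop: consume one char, or a backslash together with the next char, per step
def espGo : List Char → List Char
  | [] => []
  | [c] => if c = '\\' then [] else [c]
  | c :: d :: rest =>
    if c = '\\' then (if d = '/' then [d] else [c, d]) ++ espGo rest
    else c :: espGo (d :: rest)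

def espace_slash_py_alt (string : String) : String :=
  String.mk (espGo string.toList)

-- ===== PRECONDITION & SPEC =====
def Spec_espace_slash_py (string : String) (out : String) : Prop := out = espace_slash_py_alt string
instance (string : String) (out : String) : Decidable (Spec_espace_slash_py string out) := by unfold Spec_espace_slash_py; infer_instance

-- ===== CLAIM (what is proved, stated in full; the proofs are below) =====
def Claim_equal_espace_slash_py : Prop := ∀ (string : String), Dom_espace_slash_py string → Spec_espace_slash_py string (espace_slash_py string)

-- ===== LEMMAS AND PROOFS =====
theorem espA_foldl (l : List Char) (acc : List Char) :
    (l.foldl espAStep (false, acc)).2 = acc ++ espGo l := by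
  induction l using espGo.induct generalizing acc
  case case4 d rest ih =>
      rcases eq_or_ne d '/' with hd | hd <;>
        simp [espAStep, espGo, hd, ih, List.append_assoc]
  case case5 c d rest hc ih =>
      have h := ih (acc ++ [c])
      simp only [List.foldl] at h
      simpa [espAStep, espGo, hc, List.append_assoc] using h
  all_goals simp_all [espGo, espAStep, List.foldl]


-- ===== VERDICT (by name: the statement is the Claim_ definition above) =====
theorem espace_slash_py_spec : Claim_equal_espace_slash_py := by
  intro s _
  unfold Spec_espace_slash_py espace_slash_py espace_slash_py_alt
  rw [espA_foldl s.toList []]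
  simp
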